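-- pv_equiv track=rewrite | github.com/LideDing/middleClass | day1/bracket.py | bracket
-- ===== SOURCE A (Python) =====
-- def bracket(s) -> int:
--     if s == "":
--         return 0
--     res, status = 0, 0
--     for i in range(len(s)):  # 从左到右遍历
--         if s[i] == "(":  # 遇到左括号，status加1
--             status += 1
--         else:  # 遇到右括号，status减1
--             status -= 1
--         if status < 0:  # status小于0，说明右括号多于左括号，需要添加左括号
--             res += 1  # 添加左括号
--             status = 0  # status置0
--     return res + status  # status大于0，说明左括号多于右括号，需要添加右括号
-- ===== SOURCE B (Python) =====
-- def bracket(s) -> int: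
--     # normalize: A treats every non-'(' character as a ')'
--     t = ''.join('(' if c == '(' else ')' for c in s)
--     while '()' in t:
--         t = t.replace('()', '')
--     return len(t)
-- ===== Notes on version B (the rewrite author's own statement) =====
-- stated objective: alternative
-- what changed: B replaces A's one-pass integer balance counter with iterative string reduction: repeatedly delete '()' pairs until none remain and return the length of the residue.
import Mathlib
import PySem

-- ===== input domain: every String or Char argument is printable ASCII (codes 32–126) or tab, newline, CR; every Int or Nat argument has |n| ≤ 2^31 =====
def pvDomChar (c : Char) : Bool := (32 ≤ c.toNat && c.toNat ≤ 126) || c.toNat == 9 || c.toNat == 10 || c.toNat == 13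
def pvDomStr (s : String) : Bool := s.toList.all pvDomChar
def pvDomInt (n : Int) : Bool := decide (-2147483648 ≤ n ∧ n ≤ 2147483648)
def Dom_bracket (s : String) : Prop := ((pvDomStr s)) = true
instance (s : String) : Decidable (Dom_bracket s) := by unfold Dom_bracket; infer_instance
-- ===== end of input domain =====

-- B replaces A's one-pass integer balance counter with iterative '()'-pair deletion;
-- an alternative decomposition, not faster (A is O(n), B is O(n^2)).

-- ===== PORT A =====
-- one loop step of A: adjust status, reset when negative while counting an added '('
def bracketStep (p : Int × Int) (c : Char) : Int × Int :=
  let st := if c = '(' then p.2 + 1 else p.2 - 1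
  if st < 0 then (p.1 + 1, 0) else (p.1, st)

def bracket (s : String) : Int :=
  if s == "" then 0
  else
    let p := s.toList.foldl bracketStep (0, 0)
    p.1 + p.2

-- ===== PORT B =====
-- normalize: A treats every non-'(' character as ')'
def bNorm (t : List Char) : List Char := t.map (fun c => if c = '(' then '(' else ')')

-- one pass of t.replace("()", "") : delete non-overlapping '()' pairs left to right
def bRep : List Char → List Char
  | '(' :: ')' :: rest => bRep rest
  | c :: rest => c :: bRep rest
  | [] => []

-- '()' in t
def bPair : List Char → Bool
  | '(' :: ')' :: _ => true
  | _ :: rest => bPair rest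
  | [] => false

theorem bRep_len_le (t : List Char) : (bRep t).length ≤ t.length := by
  induction t using bRep.induct with
  | case1 rest ih => simp only [bRep, List.length_cons]; omega
  | case2 c rest hne ih => simp only [bRep, List.length_cons]; omega
  | case3 => simp [bRep]

theorem bRep_len_lt : ∀ (t : List Char), bPair t = true → (bRep t).length < t.length := by
  intro t h
  induction t using bRep.induct with
  | case1 rest ih =>
      have := bRep_len_le rest
      simp only [bRep, List.length_cons]; omega
  | case2 c rest hne ih =>
      have h' : bPair rest = true := by
        cases rest with
        | nil => simp [bPair] at h
        | cons d r =>
          by_cases hc : c = '(' <;> by_cases hd : d = ')' <;>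
            simp_all [bPair]
      simp only [bRep, List.length_cons]
      have := ih h'
      omega
  | case3 => simp [bPair] at h

-- the while loop: reduce until no '()' remains
def bReduce (t : List Char) : List Char :=
  if h : bPair t = true then bReduce (bRep t) else t
termination_by t.length
decreasing_by exact bRep_len_lt t h

def bracket_alt (s : String) : Int :=
  ((bReduce (bNorm s.toList)).length : Int)

-- ===== PRECONDITION & SPEC =====
def Spec_bracket (s : String) (out : Int) : Prop := out = bracket_alt s
instance (s : String) (out : Int) : Decidable (Spec_bracket s out) := by unfold Spec_bracket; infer_instance

-- ===== CLAIM (what is proved, stated in full; the proofs are below) =====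
def Claim_equal_bracket : Prop := ∀ (s : String), Dom_bracket s → Spec_bracket s (bracket s)

-- ===== LEMMAS AND PROOFS =====

-- A's fold is insensitive to normalization (it only tests c = '(')
theorem foldl_norm (t : List Char) (p : Int × Int) :
    (bNorm t).foldl bracketStep p = t.foldl bracketStep p := by
  induction t generalizing p with
  | nil => rfl
  | cons c r ih =>
      simp only [bNorm, List.map_cons, List.foldl_cons] at *
      rw [ih]
      congr 1
      by_cases hc : c = '(' <;> simp [bracketStep, hc]

theorem step_snd_nonneg (p : Int × Int) (c : Char) (h : 0 ≤ p.2) :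
    0 ≤ (bracketStep p c).2 := by
  unfold bracketStep; dsimp; split_ifs <;> simp <;> omega

-- deleting '()' pairs does not change the fold state, given a nonnegative status
theorem foldl_bRep (t : List Char) (p : Int × Int) (h : 0 ≤ p.2) :
    (bRep t).foldl bracketStep p = t.foldl bracketStep p := by
  induction t using bRep.induct generalizing p with
  | case1 rest ih =>
      have hpair : bracketStep (bracketStep p '(') ')' = p := by
        simp only [bracketStep]
        split_ifs with h1 h2 <;> simp_all <;> omega
      simp only [bRep, List.foldl_cons, hpair]
      exact ih p h
  | case2 c rest hne ih =>
      simp only [bRep, List.foldl_cons]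
      exact ih _ (step_snd_nonneg p c h)
  | case3 => rfl

theorem foldl_bReduce (t : List Char) (p : Int × Int) (h : 0 ≤ p.2) :
    (bReduce t).foldl bracketStep p = t.foldl bracketStep p := by
  induction t using bReduce.induct generalizing p with
  | case1 t hp ih =>
      rw [bReduce, dif_pos hp, ih _ h, foldl_bRep t p h]
  | case2 t hp =>
      rw [bReduce, dif_neg hp]

-- bRep only keeps characters of its input
theorem bRep_subset (t : List Char) : ∀ c ∈ bRep t, c ∈ t := by
  induction t using bRep.induct with
  | case1 rest ih => intro c hc; simp only [bRep] at hc; simp [ih c hc]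
  | case2 d rest hne ih =>
      intro c hc
      simp only [bRep, List.mem_cons] at hc ⊢
      rcases hc with h | h
      · exact Or.inl h
      · exact Or.inr (ih c h)
  | case3 => intro c hc; simp [bRep] at hc

theorem bReduce_subset (t : List Char) : ∀ c ∈ bReduce t, c ∈ t := by
  induction t using bReduce.induct with
  | case1 t hp ih =>
      rw [bReduce, dif_pos hp]
      intro c hc; exact bRep_subset t c (ih c hc)
  | case2 t hp =>
      rw [bReduce, dif_neg hp]
      intro c hc; exact hc

theorem bReduce_noPair (t : List Char) : bPair (bReduce t) = false := by
  induction t using bReduce.induct with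
  | case1 t hp ih => rw [bReduce, dif_pos hp]; exact ih
  | case2 t hp => rw [bReduce, dif_neg hp]; simpa using hp

-- a bracket-only list with no '()' substring is )^a ++ (^b
theorem noPair_shape (t : List Char) (hb : ∀ c ∈ t, c = '(' ∨ c = ')')
    (hp : bPair t = false) :
    ∃ a b, t = List.replicate a ')' ++ List.replicate b '(' := by
  induction t with
  | nil => exact ⟨0, 0, rfl⟩
  | cons c r ih =>
      have hbr : ∀ c ∈ r, c = '(' ∨ c = ')' := fun d hd => hb d (List.mem_cons_of_mem c hd)
      rcases hb c (List.mem_cons_self) with hc | hc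
      · subst hc
        have hpr : bPair r = false := by
          cases r with
          | nil => simp [bPair]
          | cons d u =>
              by_cases hd : d = ')'
              · subst hd; simp [bPair] at hp
              · simpa [bPair, hd] using hp
        obtain ⟨a, b, hab⟩ := ih hbr hpr
        have ha : a = 0 := by
          by_contra hane
          cases a with
          | zero => exact hane rfl
          | succ a' =>
              rw [hab] at hp
              simp [List.replicate_succ, bPair] at hp
        subst ha
        exact ⟨0, b + 1, by simp [hab, List.replicate_succ]⟩
      · subst hc
        have hpr : bPair r = false := by
          cases r with
          | nil => simp [bPair]
          | cons d u => simpa [bPair] using hp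
        obtain ⟨a, b, hab⟩ := ih hbr hpr
        exact ⟨a + 1, b, by simp [hab, List.replicate_succ]⟩

theorem foldl_replicate_close (a : ℕ) (r : Int) :
    (List.replicate a ')').foldl bracketStep (r, 0) = (r + a, 0) := by
  induction a generalizing r with
  | zero => simp
  | succ n ih =>
      rw [List.replicate_succ, List.foldl_cons]
      have : bracketStep (r, 0) ')' = (r + 1, 0) := by
        simp [bracketStep]
      rw [this, ih]
      simp; ring

theorem foldl_replicate_open (b : ℕ) (r st : Int) (h : 0 ≤ st) :
    (List.replicate b '(').foldl bracketStep (r, st) = (r, st + b) := by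
  induction b generalizing st with
  | zero => simp
  | succ n ih =>
      rw [List.replicate_succ, List.foldl_cons]
      have : bracketStep (r, st) '(' = (r, st + 1) := by
        simp [bracketStep]; omega
      rw [this, ih (st + 1) (by omega)]
      simp; ring

-- the fold over any bracket-only, pair-free list from (0,0) yields its length
theorem foldl_noPair (t : List Char) (hb : ∀ c ∈ t, c = '(' ∨ c = ')')
    (hp : bPair t = false) :
    (t.foldl bracketStep (0, 0)).1 + (t.foldl bracketStep (0, 0)).2 = (t.length : Int) := by
  obtain ⟨a, b, hab⟩ := noPair_shape t hb hp
  subst hab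
  rw [List.foldl_append, foldl_replicate_close, foldl_replicate_open b _ _ le_rfl]
  simp only [List.length_append, List.length_replicate]
  push_cast
  ring

theorem bNorm_brackets (t : List Char) : ∀ c ∈ bNorm t, c = '(' ∨ c = ')' := by
  intro c hc
  simp only [bNorm, List.mem_map] at hc
  obtain ⟨d, _, hd⟩ := hc
  by_cases h : d = '(' <;> simp [h] at hd <;> simp [hd.symm]

-- ===== VERDICT (by name: the statement is the Claim_ definition above) =====
theorem bracket_spec : Claim_equal_bracket := by
  intro s _
  unfold Spec_bracket bracket bracket_alt
  set u := bNorm s.toList with hu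
  have hfold : (s.toList.foldl bracketStep (0, 0)).1 + (s.toList.foldl bracketStep (0, 0)).2
      = ((bReduce u).length : Int) := by
    rw [← foldl_norm s.toList (0, 0), ← hu, ← foldl_bReduce u (0, 0) le_rfl]
    exact foldl_noPair _ (fun c hc => bNorm_brackets s.toList c (bReduce_subset u c hc))
      (bReduce_noPair u)
  by_cases hs : s = ""
  · subst hs
    simp [hu, bNorm, bReduce, bPair]
  · have : (s == "") = false := by simpa using hs
    rw [this]
    simpa using hfold
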